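-- pv_equiv track=rewrite | github.com/piedor/Progetto-Tria | main.py | vertice_opposto
-- ===== SOURCE A (Python) =====
-- vertici = [[0, 23], [2, 21], [3, 20],
--            [5, 18], [6, 17], [8, 15]]
--
-- def vertice_opposto(v):
--     index_v = -1
--     for i in range(0, 6):
--         if v in vertici[i]:
--             index_v = vertici[i].index(v)
--             if index_v == 0:
--                 return(vertici[i][1])
--             elif index_v == 1:
--                 return(vertici[i][0])
-- ===== SOURCE B (Python) =====
-- # Closed form: every listed pair sums to 23, so the opposite vertex is 23 - v.
-- _vertex_values = [0, 23, 2, 21, 3, 20, 5, 18, 6, 17, 8, 15]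
--
-- def vertice_opposto(v):
--     if v in _vertex_values:
--         return 23 - v
--     return None
-- ===== Notes on version B (the rewrite author's own statement) =====
-- stated objective: simpler
-- what changed: Replaces the scan over the six pairs (with list.index to pick the partner) by the closed form 23 - v guarded by membership in the flat list of the 12 vertex values, since every pair sums to 23.
import Mathlib
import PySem

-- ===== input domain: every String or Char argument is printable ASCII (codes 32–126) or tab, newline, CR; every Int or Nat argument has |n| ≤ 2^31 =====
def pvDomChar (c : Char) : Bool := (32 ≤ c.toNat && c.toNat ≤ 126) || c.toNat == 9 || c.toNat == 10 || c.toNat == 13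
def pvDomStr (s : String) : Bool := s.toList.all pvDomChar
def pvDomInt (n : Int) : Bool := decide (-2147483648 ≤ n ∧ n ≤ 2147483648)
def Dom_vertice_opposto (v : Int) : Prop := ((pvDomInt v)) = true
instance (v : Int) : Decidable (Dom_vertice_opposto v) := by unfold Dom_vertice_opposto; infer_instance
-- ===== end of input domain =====

-- B replaces A's scan over the six pairs by the closed form 23 - v guarded by
-- membership in the flat list of the 12 vertex values (each pair sums to 23).

-- ===== PORT A =====
def vertici : List (List Int) :=
  [[0, 23], [2, 21], [3, 20], [5, 18], [6, 17], [8, 15]]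

-- literal port of A's for-loop over i in range(0,6)
def verticeLoop (v : Int) : List (List Int) → Option Int
  | [] => none
  | row :: rest =>
    if v ∈ row then
      match PySem.List.index? row v with
      | some 0 => PySem.List.pyGet? row 1
      | some 1 => PySem.List.pyGet? row 0
      | _ => verticeLoop v rest
    else verticeLoop v rest

def vertice_opposto (v : Int) : Option Int := verticeLoop v vertici

-- ===== PORT B =====
def vertexValues : List Int := [0, 23, 2, 21, 3, 20, 5, 18, 6, 17, 8, 15]

def vertice_opposto_alt (v : Int) : Option Int :=
  if v ∈ vertexValues then some (23 - v) else none

-- ===== PRECONDITION & SPEC =====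
def Spec_vertice_opposto (v : Int) (out : Option Int) : Prop := out = vertice_opposto_alt v
instance (v : Int) (out : Option Int) : Decidable (Spec_vertice_opposto v out) := by unfold Spec_vertice_opposto; infer_instance

-- ===== CLAIM (what is proved, stated in full; the proofs are below) =====
def Claim_equal_vertice_opposto : Prop := ∀ (v : Int), Dom_vertice_opposto v → Spec_vertice_opposto v (vertice_opposto v)

-- ===== LEMMAS AND PROOFS =====

-- ===== VERDICT (by name: the statement is the Claim_ definition above) =====
theorem vertice_opposto_spec : Claim_equal_vertice_opposto := by
  intro v _
  unfold Spec_vertice_opposto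
  by_cases h : v ∈ vertexValues
  · simp only [vertexValues, List.mem_cons, List.not_mem_nil, or_false] at h
    rcases h with h | h | h | h | h | h | h | h | h | h | h | h <;> subst h <;> decide
  · simp only [vertexValues, List.mem_cons, List.not_mem_nil, or_false, not_or] at h
    obtain ⟨h0, h1, h2, h3, h4, h5, h6, h7, h8, h9, h10, h11⟩ := h
    simp [vertice_opposto, vertice_opposto_alt, vertexValues, vertici, verticeLoop,
      h0, h1, h2, h3, h4, h5, h6, h7, h8, h9, h10, h11]
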